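-- pv_equiv track=rewrite | github.com/Rayeta76/caption | src/io/output_handler.py | _generar_nombre_archivo
-- ===== SOURCE A (Python) =====
-- def _generar_nombre_archivo(descripcion: str, extension: str) -> str:
--     """Genera un nombre de archivo válido basado en la descripción."""
--     # Limpiar la descripción para crear un nombre de archivo válido
--     nombre_limpio = descripcion.split('.')[0][:70]
--     # Reemplazar caracteres problemáticos
--     caracteres_invalidos = ['<', '>', ':', '"', '|', '?', '*', '\\', '/']
--     for char in caracteres_invalidos:
--         nombre_limpio = nombre_limpio.replace(char, '-')
--
--     # Reemplazar espacios múltiples y limpiar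
--     nombre_limpio = ' '.join(nombre_limpio.split())
--     nombre_limpio = nombre_limpio.replace(' ', '_')
--
--     # Asegurar que no esté vacío
--     if not nombre_limpio:
--         nombre_limpio = "imagen_sin_descripcion"
--
--     return nombre_limpio + extension.lower()
-- ===== SOURCE B (Python) =====
-- def _generar_nombre_archivo(descripcion: str, extension: str) -> str:
--     """Genera un nombre de archivo válido basado en la descripción."""
--     prefijo = descripcion.split('.')[0][:70]
--     invalidos = '<>:"|?*\\/'
--     out = []
--     pendiente = False
--     for c in prefijo:
--         if c.isspace():
--             pendiente = True
--         else:
--             if pendiente and out: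
--                 out.append('_')
--             pendiente = False
--             out.append('-' if c in invalidos else c)
--     nombre = ''.join(out) or "imagen_sin_descripcion"
--     return nombre + extension.lower()
-- ===== Notes on version B (the rewrite author's own statement) =====
-- stated objective: alternative
-- what changed: Replaces A's nine whole-string replace() passes plus the split()/join/replace whitespace pipeline with a single left-to-right scan over the prefix that maps invalid characters to '-' and collapses whitespace runs to one '_' via a pending flag.
import Mathlib
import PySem

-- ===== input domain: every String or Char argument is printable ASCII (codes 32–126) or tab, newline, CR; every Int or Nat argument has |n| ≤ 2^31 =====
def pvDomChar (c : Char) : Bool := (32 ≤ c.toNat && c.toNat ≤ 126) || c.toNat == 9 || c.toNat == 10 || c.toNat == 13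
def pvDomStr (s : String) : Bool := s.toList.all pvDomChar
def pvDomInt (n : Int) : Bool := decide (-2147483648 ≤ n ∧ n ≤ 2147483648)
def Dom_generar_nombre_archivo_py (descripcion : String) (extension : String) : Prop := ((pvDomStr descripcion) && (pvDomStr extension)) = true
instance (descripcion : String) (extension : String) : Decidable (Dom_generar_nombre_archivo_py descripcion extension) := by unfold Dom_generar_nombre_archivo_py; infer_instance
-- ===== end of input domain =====

-- B replaces A's nine replace() passes and split/join/replace whitespace pipeline with one
-- left-to-right scan (alternative decomposition, same cost class).

-- ===== PORT A =====
def pvCaracteresInvalidos : List String := ["<", ">", ":", "\"", "|", "?", "*", "\\", "/"]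

def generar_nombre_archivo_py (descripcion : String) (extension : String) : String :=
  -- nombre_limpio = descripcion.split('.')[0][:70]   (split('.') is never empty, so [0] never raises)
  let partes := (PySem.Str.split? descripcion ".").getD []
  let nombre0 := PySem.List.pyGetD partes 0 ""
  let nombre1 := PySem.Str.slice nombre0 none (some 70)
  -- for char in caracteres_invalidos: nombre_limpio = nombre_limpio.replace(char, '-')
  let nombre2 := pvCaracteresInvalidos.foldl (fun s ch => PySem.Str.replace s ch "-") nombre1
  -- nombre_limpio = ' '.join(nombre_limpio.split())
  let nombre3 := PySem.Str.join " " (PySem.Str.split₀ nombre2)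
  -- nombre_limpio = nombre_limpio.replace(' ', '_')
  let nombre4 := PySem.Str.replace nombre3 " " "_"
  -- if not nombre_limpio: nombre_limpio = "imagen_sin_descripcion"
  let nombre5 := if nombre4 = "" then "imagen_sin_descripcion" else nombre4
  -- return nombre_limpio + extension.lower()   (string concatenation, exact)
  String.ofList (nombre5.toList ++ (PySem.Str.lower extension).toList)

-- ===== PORT B =====
def pvInvalidChars : List Char := ['<', '>', ':', '"', '|', '?', '*', '\\', '/']

-- the single scan of Source B: out is kept reversed, pendiente collapses whitespace runs
def pvScanGo : List Char → Bool → List Char → List Char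
  | [], _, acc => acc.reverse
  | c :: rest, pendiente, acc =>
    if PySem.Chars.isspace c then pvScanGo rest true acc
    else
      let acc' := if pendiente && !acc.isEmpty then '_' :: acc else acc
      pvScanGo rest false ((if pvInvalidChars.contains c then '-' else c) :: acc')

def generar_nombre_archivo_py_alt (descripcion : String) (extension : String) : String :=
  -- prefijo = descripcion.split('.')[0][:70]
  let partes := (PySem.Str.split? descripcion ".").getD []
  let prefijo := PySem.Str.slice (PySem.List.pyGetD partes 0 "") none (some 70)
  let out := pvScanGo prefijo.toList false []
  let nombre := if out.isEmpty then "imagen_sin_descripcion" else String.ofList out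
  String.ofList (nombre.toList ++ (PySem.Str.lower extension).toList)

-- ===== PRECONDITION & SPEC =====
def Spec_generar_nombre_archivo_py (descripcion : String) (extension : String) (out : String) : Prop := out = generar_nombre_archivo_py_alt descripcion extension
instance (descripcion : String) (extension : String) (out : String) : Decidable (Spec_generar_nombre_archivo_py descripcion extension out) := by unfold Spec_generar_nombre_archivo_py; infer_instance

-- ===== CLAIM (what is proved, stated in full; the proofs are below) =====
def Claim_equal_generar_nombre_archivo_py : Prop := ∀ (descripcion : String) (extension : String), Dom_generar_nombre_archivo_py descripcion extension → Spec_generar_nombre_archivo_py descripcion extension (generar_nombre_archivo_py descripcion extension)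

-- ===== LEMMAS AND PROOFS =====

-- the character map B applies to kept characters
def pvF (c : Char) : Char := if pvInvalidChars.contains c then '-' else c
-- the map A's final replace(' ', '_') applies
def pvG (c : Char) : Char := if c = ' ' then '_' else c

-- single-character replace is a map
theorem pvRepGo (a b : Char) (l : List Char) : ∀ (fuel : Nat) (acc : List Char), l.length ≤ fuel →
    PySem.Chars.replace.go [a] [b] fuel l acc = acc.reverse ++ l.map (fun c => if c = a then b else c) := by
  induction l with
  | nil => intro fuel acc h; cases fuel <;> simp [PySem.Chars.replace.go]
  | cons c t ih =>
    intro fuel acc h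
    match fuel with
    | fuel + 1 =>
      have ht : t.length ≤ fuel := by simpa using Nat.le_of_succ_le_succ h
      by_cases hc : a = c
      · subst hc
        simp [PySem.Chars.replace.go, List.isPrefixOf, ih fuel (b :: acc) ht]
      · simp [PySem.Chars.replace.go, List.isPrefixOf, Ne.symm hc, hc, ih fuel (c :: acc) ht]

theorem pvReplace_single (a b : Char) (s : List Char) :
    PySem.Chars.replace s [a] [b] = s.map (fun c => if c = a then b else c) := by
  simp [PySem.Chars.replace, pvRepGo a b s s.length [] le_rfl]

-- the nine replace passes of A compose to the single map pvF
theorem pvNine (s : String) :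
    (pvCaracteresInvalidos.foldl (fun t ch => PySem.Str.replace t ch "-") s).toList = s.toList.map pvF := by
  simp only [pvCaracteresInvalidos, List.foldl_cons, List.foldl_nil, PySem.Str.toList_replace]
  simp only [show ("<" : String).toList = ['<'] from rfl, show (">" : String).toList = ['>'] from rfl,
    show (":" : String).toList = [':'] from rfl, show ("\"" : String).toList = ['"'] from rfl,
    show ("|" : String).toList = ['|'] from rfl, show ("?" : String).toList = ['?'] from rfl,
    show ("*" : String).toList = ['*'] from rfl, show ("\\" : String).toList = ['\\'] from rfl,
    show ("/" : String).toList = ['/'] from rfl, show ("-" : String).toList = ['-'] from rfl]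
  simp only [pvReplace_single, List.map_map]
  apply List.map_congr_left
  intro c _
  by_cases h : c ∈ pvInvalidChars
  · simp only [pvInvalidChars, List.mem_cons, List.not_mem_nil, or_false] at h
    rcases h with rfl|rfl|rfl|rfl|rfl|rfl|rfl|rfl|rfl <;> rfl
  · simp only [pvInvalidChars, List.mem_cons, List.not_mem_nil, or_false, not_or] at h
    obtain ⟨h1, h2, h3, h4, h5, h6, h7, h8, h9⟩ := h
    simp [Function.comp, pvF, pvInvalidChars, h1, h2, h3, h4, h5, h6, h7, h8, h9]

-- pvF does not change whether a character is whitespace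
theorem pvF_space (c : Char) : PySem.Chars.isspace (pvF c) = PySem.Chars.isspace c := by
  unfold pvF
  split
  · next h =>
    have h' : c ∈ pvInvalidChars := by simpa using h
    simp only [pvInvalidChars, List.mem_cons, List.not_mem_nil, or_false] at h'
    rcases h' with rfl|rfl|rfl|rfl|rfl|rfl|rfl|rfl|rfl <;> rfl
  · rfl

-- words produced by split() are nonempty and whitespace-free
theorem pvSplitGoWords : ∀ (l cur : List Char) (acc : List (List Char)),
    (∀ c ∈ cur, PySem.Chars.isspace c = false) →
    (∀ w ∈ acc, w ≠ [] ∧ ∀ c ∈ w, PySem.Chars.isspace c = false) →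
    ∀ w ∈ PySem.Chars.split₀.go l cur acc, w ≠ [] ∧ ∀ c ∈ w, PySem.Chars.isspace c = false := by
  intro l
  induction l with
  | nil =>
    intro cur acc hcur hacc w hw
    by_cases hc : cur.isEmpty
    · simp only [PySem.Chars.split₀.go, hc, if_true, List.mem_reverse] at hw
      exact hacc w hw
    · simp only [PySem.Chars.split₀.go, hc, if_false, Bool.false_eq_true,
        List.mem_reverse, List.mem_cons] at hw
      rcases hw with hw | hw
      · subst hw
        refine ⟨by simpa [List.isEmpty_iff] using hc, ?_⟩
        intro d hd; exact hcur d (by simpa using hd)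
      · exact hacc w hw
  | cons c t ih =>
    intro cur acc hcur hacc w hw
    by_cases hs : PySem.Chars.isspace c
    · by_cases hc : cur.isEmpty
      · have hcur' : cur = [] := List.isEmpty_iff.mp hc
        subst hcur'
        simp only [PySem.Chars.split₀.go, hs, if_true, List.isEmpty_nil] at hw
        exact ih [] acc (by simp) hacc w hw
      · simp only [PySem.Chars.split₀.go, hs, if_true, hc, if_false, Bool.false_eq_true] at hw
        refine ih [] (cur.reverse :: acc) (by simp) ?_ w hw
        intro v hv
        rcases List.mem_cons.mp hv with hv | hv
        · subst hv
          refine ⟨by simpa [List.isEmpty_iff] using hc, ?_⟩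
          intro d hd; exact hcur d (by simpa using hd)
        · exact hacc v hv
    · simp only [PySem.Chars.split₀.go, hs, if_false, Bool.false_eq_true] at hw
      refine ih (c :: cur) acc ?_ hacc w hw
      intro d hd
      rcases List.mem_cons.mp hd with hd | hd
      · subst hd; simpa using hs
      · exact hcur d hd

theorem pvInter_cons_cons (sep x y : List Char) (l : List (List Char)) :
    List.intercalate sep (x :: y :: l) = x ++ sep ++ List.intercalate sep (y :: l) := by
  simp [List.intercalate, List.intersperse]

theorem pvInterSnoc (sep y : List Char) (l : List (List Char)) :
    List.intercalate sep (l ++ [y]) = if l = [] then y else List.intercalate sep l ++ sep ++ y := by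
  induction l with
  | nil => simp [List.intercalate]
  | cons x t ih =>
    cases t with
    | nil => simp [List.intercalate]
    | cons a t' =>
      rw [List.cons_append, List.cons_append, pvInter_cons_cons, ← List.cons_append, ih,
        pvInter_cons_cons]
      simp [List.append_assoc]

theorem pvInterNeNil (l : List (List Char)) (h : ∀ w ∈ l, w ≠ []) (hl : l ≠ []) :
    List.intercalate ['_'] l ≠ [] := by
  cases l with
  | nil => exact absurd rfl hl
  | cons x t =>
    cases t with
    | nil => simpa [List.intercalate] using h x (by simp)
    | cons y t' =>
      rw [pvInter_cons_cons]
      have hx := h x (by simp)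
      intro hcontra
      simp only [List.append_assoc, List.append_eq_nil_iff] at hcontra
      exact hx hcontra.1

-- replacing ' ' by '_' in a ' '-join of space-free words is the '_'-join
theorem pvMapJoin : ∀ (ws : List (List Char)),
    (∀ w ∈ ws, ∀ c ∈ w, PySem.Chars.isspace c = false) →
    (List.intercalate [' '] ws).map pvG = List.intercalate ['_'] ws := by
  intro ws
  induction ws with
  | nil => intro _; simp [List.intercalate]
  | cons x t ih =>
    intro h
    have hx : x.map pvG = x := by
      refine (List.map_congr_left ?_).trans (List.map_id x)
      intro c hc
      have hcs := h x (by simp) c hc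
      unfold pvG
      split
      · next he => subst he; exact absurd hcs (by decide)
      · rfl
    cases t with
    | nil => simpa [List.intercalate] using hx
    | cons y t' =>
      rw [pvInter_cons_cons, pvInter_cons_cons]
      simp only [List.map_append, hx]
      rw [ih (fun w hw c hc => h w (by simp [hw]) c hc)]
      simp [pvG, List.append_assoc]

-- main invariant: the single scan equals '_'-joining the words of the pvF-mapped input
theorem pvScan_eq : ∀ (cs : List Char) (pending : Bool) (acc cur : List Char) (wacc : List (List Char)),
    acc.reverse = List.intercalate ['_'] (wacc.reverse ++ (if cur = [] then [] else [cur.reverse])) →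
    (pending = true → cur = []) →
    (pending = false → cur = [] → wacc = []) →
    (∀ w ∈ wacc, w ≠ []) →
    pvScanGo cs pending acc = List.intercalate ['_'] (PySem.Chars.split₀.go (cs.map pvF) cur wacc) := by
  intro cs
  induction cs with
  | nil =>
    intro pending acc cur wacc h1 _ _ _
    cases cur with
    | nil => simpa [pvScanGo, PySem.Chars.split₀.go] using h1
    | cons d cur' =>
      simp only [pvScanGo, List.map_nil, PySem.Chars.split₀.go, List.isEmpty_cons,
        Bool.false_eq_true, if_false, List.reverse_cons]
      rw [h1]
      simp
  | cons c rest ih =>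
    intro pending acc cur wacc h1 h2 h3 h4
    by_cases hs : PySem.Chars.isspace c = true
    · have hsf : PySem.Chars.isspace (pvF c) = true := (pvF_space c).trans hs
      simp only [pvScanGo, hs, if_true, List.map_cons, PySem.Chars.split₀.go, hsf]
      by_cases hc : cur.isEmpty
      · have hcur : cur = [] := List.isEmpty_iff.mp hc
        subst hcur
        simp only [List.isEmpty_nil, if_true]
        exact ih true acc [] wacc (by simpa using h1) (fun _ => rfl) (by simp) h4
      · have hcur : cur ≠ [] := by simpa [List.isEmpty_iff] using hc
        simp only [hc, if_false, Bool.false_eq_true]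
        refine ih true acc [] (cur.reverse :: wacc) ?_ (fun _ => rfl) (by simp) ?_
        · simpa [hcur] using h1
        · intro w hw
          rcases List.mem_cons.mp hw with hw | hw
          · subst hw; simpa using hcur
          · exact h4 w hw
    · have hsf : PySem.Chars.isspace (pvF c) = false := by
        rw [pvF_space c]; simpa using hs
      simp only [pvScanGo, hs, if_false, List.map_cons, PySem.Chars.split₀.go, hsf,
        Bool.false_eq_true]
      refine ih false ((if pvInvalidChars.contains c then '-' else c) ::
          (if pending && !acc.isEmpty then '_' :: acc else acc)) (pvF c :: cur) wacc
          ?_ (by simp) (by simp) h4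
      have hfc : (if pvInvalidChars.contains c then '-' else c) = pvF c := rfl
      have hsnoc : List.intercalate ['_'] (wacc.reverse ++ [(pvF c :: cur).reverse]) =
          (if wacc.reverse = [] then [] else List.intercalate ['_'] wacc.reverse ++ ['_']) ++
            cur.reverse ++ [pvF c] := by
        rw [List.reverse_cons, pvInterSnoc]
        split_ifs <;> simp [List.append_assoc]
      rw [hfc, if_neg (by simp : ¬((pvF c :: cur) = [])), hsnoc, List.reverse_cons]
      by_cases hp : pending = true
      · have hcur : cur = [] := h2 hp
        subst hcur; subst hp
        rw [if_pos rfl, List.append_nil] at h1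
        by_cases ha : acc.isEmpty
        · have hacc : acc = [] := List.isEmpty_iff.mp ha
          subst hacc
          have hwacc : wacc = [] := by
            by_contra hne
            have hrev : wacc.reverse ≠ [] := by simpa using hne
            have h4' : ∀ w ∈ wacc.reverse, w ≠ [] := fun w hw => h4 w (by simpa using hw)
            exact pvInterNeNil wacc.reverse h4' hrev (by simpa using h1.symm)
          subst hwacc
          simp
        · have hacc : acc ≠ [] := by simpa [List.isEmpty_iff] using ha
          have hwacc : wacc.reverse ≠ [] := by
            intro hw
            apply hacc
            have hw' : wacc = [] := by simpa using hw
            subst hw'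
            simpa [List.intercalate] using h1
          rw [if_pos (by simp [ha]), if_neg hwacc, List.reverse_cons, h1]
          simp [List.append_assoc]
      · have hp' : pending = false := by simpa using hp
        subst hp'
        rw [if_neg (by simp)]
        cases cur with
        | nil =>
          have hwacc : wacc = [] := h3 rfl rfl
          subst hwacc
          have hrev : acc.reverse = [] := by simpa [List.intercalate] using h1
          have hacc : acc = [] := List.reverse_eq_nil_iff.mp hrev
          subst hacc
          simp
        | cons d cur' =>
          rw [if_neg (by simp)] at h1
          rw [pvInterSnoc] at h1
          rw [h1]
          split_ifs <;> simp [List.append_assoc]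

-- A's whole cleaning pipeline equals the single scan
theorem pvCore (P : List Char) :
    PySem.Chars.replace (PySem.Chars.join [' '] (PySem.Chars.split₀ (P.map pvF))) [' '] ['_'] =
      pvScanGo P false [] := by
  have hwords := pvSplitGoWords (P.map pvF) [] [] (by simp) (by simp)
  rw [pvReplace_single]
  have hg : (PySem.Chars.join [' '] (PySem.Chars.split₀ (P.map pvF))).map
      (fun c => if c = ' ' then '_' else c) =
      (PySem.Chars.join [' '] (PySem.Chars.split₀ (P.map pvF))).map pvG := rfl
  rw [hg]
  unfold PySem.Chars.join
  rw [show PySem.Chars.split₀ (List.map pvF P) = PySem.Chars.split₀.go (List.map pvF P) [] [] from rfl]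
  rw [pvMapJoin _ (fun w hw => (hwords w hw).2)]
  rw [pvScan_eq P false [] [] [] (by simp [List.intercalate]) (by simp) (fun _ _ => rfl) (by simp)]

theorem pvMain (d e : String) : generar_nombre_archivo_py d e = generar_nombre_archivo_py_alt d e := by
  unfold generar_nombre_archivo_py generar_nombre_archivo_py_alt
  dsimp only []
  set P := PySem.Str.slice (PySem.List.pyGetD ((PySem.Str.split? d ".").getD []) 0 "") none (some 70) with hP
  have h4 : (PySem.Str.replace (PySem.Str.join " " (PySem.Str.split₀
      (pvCaracteresInvalidos.foldl (fun s ch => PySem.Str.replace s ch "-") P))) " " "_").toList =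
      pvScanGo P.toList false [] := by
    rw [PySem.Str.toList_replace, PySem.Str.toList_join]
    simp only [PySem.Str.split₀, List.map_map]
    have hid : (List.map (String.toList ∘ String.ofList)
        (PySem.Chars.split₀ (pvCaracteresInvalidos.foldl (fun s ch => PySem.Str.replace s ch "-") P).toList)) =
        PySem.Chars.split₀ (pvCaracteresInvalidos.foldl (fun s ch => PySem.Str.replace s ch "-") P).toList := by
      refine (List.map_congr_left ?_).trans (List.map_id _)
      intro w _; simp
    rw [hid, pvNine]
    exact pvCore P.toList
  by_cases hz : pvScanGo P.toList false [] = []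
  · have hA : PySem.Str.replace (PySem.Str.join " " (PySem.Str.split₀
        (pvCaracteresInvalidos.foldl (fun s ch => PySem.Str.replace s ch "-") P))) " " "_" = "" :=
      String.toList_eq_nil_iff.mp (h4.trans hz)
    rw [if_pos hA, if_pos (by simpa [List.isEmpty_iff] using hz)]
  · have hA : PySem.Str.replace (PySem.Str.join " " (PySem.Str.split₀
        (pvCaracteresInvalidos.foldl (fun s ch => PySem.Str.replace s ch "-") P))) " " "_" ≠ "" := by
      intro h
      exact hz (by rw [← h4, h]; rfl)
    rw [if_neg hA, if_neg (by simpa [List.isEmpty_iff] using hz)]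
    refine congrArg String.ofList ?_
    rw [h4]
    simp

-- ===== VERDICT (by name: the statement is the Claim_ definition above) =====
theorem generar_nombre_archivo_py_spec : Claim_equal_generar_nombre_archivo_py := by
  intro d e _
  unfold Spec_generar_nombre_archivo_py
  exact pvMain d e
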